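-- pv_equiv track=rewrite | github.com/gta191977649/Music-Outlier-Browser | outlier/helper.py | escapePath
-- ===== SOURCE A (Python) =====
-- def escapePath(path):
--     chars = [
--         "\"",
--         "\\",
--         "/",
--         " "
--     ]
--     path = path.strip()
--     for char in chars: path = path.replace(char,"")
--     return path
-- ===== SOURCE B (Python) =====
-- def escapePath(path):
--     s = path.strip()
--     return ''.join(c for c in s if c not in '"\\/ ')
-- ===== Notes on version B (the rewrite author's own statement) =====
-- stated objective: alternative
-- what changed: Replaces the four sequential replace() scans with one single-pass filter over the stripped string (set-membership test per character); same asymptotic cost, different traversal.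
import Mathlib
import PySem

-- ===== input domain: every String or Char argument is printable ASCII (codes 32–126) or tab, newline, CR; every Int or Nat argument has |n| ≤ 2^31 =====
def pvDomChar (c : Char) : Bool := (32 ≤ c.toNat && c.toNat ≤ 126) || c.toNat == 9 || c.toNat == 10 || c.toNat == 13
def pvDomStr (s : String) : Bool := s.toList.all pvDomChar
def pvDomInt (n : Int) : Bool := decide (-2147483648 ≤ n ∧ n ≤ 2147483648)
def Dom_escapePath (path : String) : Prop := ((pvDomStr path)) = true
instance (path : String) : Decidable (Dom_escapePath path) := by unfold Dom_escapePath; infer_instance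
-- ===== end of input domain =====

-- B replaces A's four sequential replace() scans with one filtering pass over the stripped string.


-- ===== PORT A =====
-- A: strip, then for each of the four chars, replace it with "" (four full scans).
def escapePath (path : String) : String :=
  let chars : List String := ["\"", "\\", "/", " "]
  let path := PySem.Str.strip path
  chars.foldl (fun p ch => PySem.Str.replace p ch "") path

-- ===== PORT B =====
-- B: strip, then one pass keeping every character not in the removal set.
def escapePath_alt (path : String) : String :=
  let s := PySem.Chars.strip path.toList
  String.ofList (s.filter (fun c => !("\"\\/ ".toList.contains c)))

-- ===== PRECONDITION & SPEC =====
def Spec_escapePath (path : String) (out : String) : Prop := out = escapePath_alt path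
instance (path : String) (out : String) : Decidable (Spec_escapePath path out) := by unfold Spec_escapePath; infer_instance

-- ===== CLAIM (what is proved, stated in full; the proofs are below) =====
def Claim_equal_escapePath : Prop := ∀ (path : String), Dom_escapePath path → Spec_escapePath path (escapePath path)

-- ===== LEMMAS AND PROOFS =====

-- replace.go with a one-char pattern and empty replacement is a filter (given enough fuel)
theorem replace_go_filter (c : Char) (fuel : Nat) :
    ∀ (l acc : List Char), l.length ≤ fuel →
      PySem.Chars.replace.go [c] [] fuel l acc = acc.reverse ++ l.filter (· ≠ c) := by
  induction fuel with
  | zero =>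
    intro l acc h
    have : l = [] := List.eq_nil_of_length_eq_zero (Nat.le_zero.mp h)
    subst this; simp [PySem.Chars.replace.go]
  | succ n ih =>
    intro l acc h
    cases l with
    | nil => simp [PySem.Chars.replace.go]
    | cons x t =>
      simp only [PySem.Chars.replace.go]
      by_cases hx : x = c
      · subst hx
        have : List.isPrefixOf [x] (x :: t) = true := by simp [List.isPrefixOf]
        rw [if_pos this]
        have e1 : List.drop [x].length (x :: t) = t := rfl
        rw [e1]
        simp only [List.length_cons] at h
        rw [List.reverse_nil, List.nil_append, ih t acc (by omega)]
        simp [List.filter]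
      · have : List.isPrefixOf [c] (x :: t) = false := by
          simp [List.isPrefixOf]
          intro hc; exact absurd hc.symm hx
        rw [if_neg (by simp [this])]
        simp only [List.length_cons] at h
        rw [ih t (x :: acc) (by omega)]
        simp [List.filter, hx]

theorem replace_one_empty (s : List Char) (c : Char) :
    PySem.Chars.replace s [c] [] = s.filter (· ≠ c) := by
  have e : PySem.Chars.replace s [c] [] = PySem.Chars.replace.go [c] [] s.length s [] := by
    rw [PySem.Chars.replace]; rfl
  rw [e, replace_go_filter c s.length s [] (le_refl _)]; rfl

-- ===== VERDICT (by name: the statement is the Claim_ definition above) =====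
theorem escapePath_spec : Claim_equal_escapePath := by
  intro path _
  unfold Spec_escapePath escapePath escapePath_alt
  simp only [List.foldl]
  apply String.toList_injective  -- conclude from equal char lists
  simp only [PySem.Str.toList_replace, PySem.Str.toList_strip, String.toList_ofList]
  rw [show ("\"".toList) = ['"'] from rfl, show ("\\".toList) = ['\\'] from rfl,
      show ("/".toList) = ['/'] from rfl, show (" ".toList) = [' '] from rfl,
      show ("".toList) = ([] : List Char) from rfl]
  rw [replace_one_empty, replace_one_empty, replace_one_empty, replace_one_empty]
  simp only [List.filter_filter]
  apply List.filter_congr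
  intro c _
  rw [show ("\"\\/ ".toList) = ['"', '\\', '/', ' '] from rfl]
  by_cases h1 : c = '"' <;> by_cases h2 : c = '\\' <;> by_cases h3 : c = '/' <;> by_cases h4 : c = ' ' <;>
    simp [h1, h2, h3, h4]
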